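-- pv_equiv track=rewrite | github.com/HarrisonMc555/adventofcode | 2018/day14a.py | get_digits
-- ===== SOURCE A (Python) =====
-- BASE = 10
--
-- def get_digits(num):
--     assert num >= 0
--     if num == 0:
--         return [0]
--     digits = []
--     while num > 0:
--         digits.append(num % BASE)
--         num //= BASE
--     return list(reversed(digits))
-- ===== SOURCE B (Python) =====
-- def get_digits(num):
--     assert num >= 0
--     return [ord(c) - ord('0') for c in str(num)]
-- ===== Notes on version B (the rewrite author's own statement) =====
-- stated objective: simpler
-- what changed: Replaces the modulo/floor-division loop with appended digits plus a final reversal (and the special zero case) by a single left-to-right pass over the decimal string str(num).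
import Mathlib
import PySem

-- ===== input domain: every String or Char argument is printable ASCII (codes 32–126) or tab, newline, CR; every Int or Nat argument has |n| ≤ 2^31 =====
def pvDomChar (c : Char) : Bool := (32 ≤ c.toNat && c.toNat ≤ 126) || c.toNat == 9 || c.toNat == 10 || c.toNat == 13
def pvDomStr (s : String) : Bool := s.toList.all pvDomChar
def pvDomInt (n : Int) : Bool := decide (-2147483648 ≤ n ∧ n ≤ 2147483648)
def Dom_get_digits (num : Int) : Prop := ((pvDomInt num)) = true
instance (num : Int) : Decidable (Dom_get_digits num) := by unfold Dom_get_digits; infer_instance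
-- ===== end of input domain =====

-- B replaces A's modulo/division loop (with final reversal and special zero case) by a single
-- left-to-right pass over the decimal string str(num): simpler, same cost.


-- ===== PORT A =====
-- the 'while num > 0' loop of A, carrying the accumulating digits list
def getDigitsLoop (num : Int) (digits : List Int) : List Int :=
  if _h : 0 < num then
    getDigitsLoop (PySem.Int.floordiv num 10) (digits ++ [PySem.Int.mod num 10])
  else digits
termination_by num.toNat
decreasing_by
  rw [PySem.Int.floordiv_eq_ediv_of_pos (by omega : (0:Int) < 10)]
  omega

def get_digits (num : Int) : List Int :=
  if num == 0 then [0]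
  else (getDigitsLoop num []).reverse

-- ===== PORT B =====
-- [ord(c) - ord('0') for c in str(num)]  (ord '0' = 48)
def get_digits_alt (num : Int) : List Int :=
  (PySem.Int.toChars num).map (fun c => ((c.toNat : Int) - 48))

-- ===== PRECONDITION & SPEC =====
-- A's 'assert num >= 0' raises AssertionError for negative input (B keeps the same assert).
def Pre_get_digits (num : Int) : Prop := 0 ≤ num
instance (num : Int) : Decidable (Pre_get_digits num) := by unfold Pre_get_digits; infer_instance
def pvWitness_get_digits : Int := (2021)

def Spec_get_digits (num : Int) (out : List Int) : Prop := out = get_digits_alt num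
instance (num : Int) (out : List Int) : Decidable (Spec_get_digits num out) := by unfold Spec_get_digits; infer_instance

-- ===== CLAIM (what is proved, stated in full; the proofs are below) =====
def Claim_equal_get_digits : Prop := ∀ (num : Int), Dom_get_digits num → Pre_get_digits num → Spec_get_digits num (get_digits num)

-- ===== LEMMAS AND PROOFS =====

-- reference: A's digit list least-significant-first, on the Nat side
def natRevDigits (m : Nat) : List Int :=
  if h : m = 0 then [] else ((m % 10 : Nat) : Int) :: natRevDigits (m / 10)
termination_by m
decreasing_by exact Nat.div_lt_self (Nat.pos_of_ne_zero h) (by omega)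

lemma digitChar_val (d : Nat) (h : d < 10) :
    ((Nat.digitChar d).toNat : Int) - 48 = (d : Int) := by
  interval_cases d <;> decide

lemma natRevDigits_zero : natRevDigits 0 = [] := by rw [natRevDigits]; rfl

lemma natRevDigits_pos (m : Nat) (h : m ≠ 0) :
    natRevDigits m = ((m % 10 : Nat) : Int) :: natRevDigits (m / 10) := by
  rw [natRevDigits]; simp only [h, dif_neg, not_false_iff]

lemma getDigitsLoop_eq (m : Nat) : ∀ acc : List Int,
    getDigitsLoop (m : Int) acc = acc ++ natRevDigits m := by
  induction m using Nat.strong_induction_on with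
  | _ m ih =>
    intro acc
    by_cases hm : m = 0
    · subst hm
      rw [getDigitsLoop, natRevDigits_zero]
      simp
    · rw [getDigitsLoop]
      have hpos : (0 : Int) < (m : Int) := by exact_mod_cast Nat.pos_of_ne_zero hm
      have hfd : PySem.Int.floordiv (m : Int) 10 = ((m / 10 : Nat) : Int) := by
        exact_mod_cast PySem.Int.floordiv_natCast m 10
      have hmd : PySem.Int.mod (m : Int) 10 = ((m % 10 : Nat) : Int) := by
        exact_mod_cast PySem.Int.mod_natCast m 10
      rw [dif_pos hpos, hfd, hmd, ih (m / 10) (Nat.div_lt_self (Nat.pos_of_ne_zero hm) (by omega))]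
      rw [natRevDigits_pos m hm]
      simp

lemma toDigitsCore_map (fuel : Nat) : ∀ (n : Nat) (ds : List Char), 0 < n → n < fuel →
    (Nat.toDigitsCore 10 fuel n ds).map (fun c => ((c.toNat : Int) - 48)) =
      (natRevDigits n).reverse ++ ds.map (fun c => ((c.toNat : Int) - 48)) := by
  induction fuel with
  | zero => intro n ds h hlt; omega
  | succ fuel ih =>
    intro n ds h hlt
    rw [Nat.toDigitsCore]
    by_cases h0 : n / 10 = 0
    · rw [if_pos h0]
      rw [natRevDigits_pos n (by omega), h0, natRevDigits_zero]
      simp [digitChar_val (n % 10) (Nat.mod_lt _ (by omega))]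
    · rw [if_neg h0]
      rw [ih (n / 10) _ (Nat.pos_of_ne_zero h0)
        (by have := Nat.div_lt_self h (by omega : 1 < 10); omega)]
      rw [natRevDigits_pos n (by omega)]
      simp [digitChar_val (n % 10) (Nat.mod_lt _ (by omega))]

-- ===== VERDICT (by name: the statement is the Claim_ definition above) =====
theorem get_digits_spec : Claim_equal_get_digits := by
  intro num _ hpre
  unfold Spec_get_digits
  by_cases h0 : num = 0
  · subst h0; decide
  · have hpos : 0 < num := lt_of_le_of_ne hpre (Ne.symm h0)
    obtain ⟨m, rfl⟩ : ∃ m : Nat, num = (m : Int) := ⟨num.toNat, (Int.toNat_of_nonneg hpre).symm⟩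
    have hm : 0 < m := by exact_mod_cast hpos
    unfold get_digits get_digits_alt
    rw [if_neg (by simpa using h0)]
    rw [getDigitsLoop_eq m []]
    unfold PySem.Int.toChars
    rw [if_neg (by omega)]
    have : (m : Int).toNat = m := rfl
    rw [this]
    unfold Nat.toDigits
    rw [toDigitsCore_map (m + 1) m [] hm (by omega)]
    simp
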